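-- pv_equiv track=rewrite | github.com/RichJamo/hydrex-optimiser | scripts/claim_and_swap_rewards.py | chunk_claim_inputs
-- ===== SOURCE A (Python) =====
-- from typing import Dict, List, Optional, Set, Tuple
--
-- def chunk_claim_inputs(
--     bribe_to_tokens: Dict[str, List[str]],
--     batch_size: int,
-- ) -> List[Tuple[List[str], List[List[str]]]]:
--     """Split bribe/token arrays into contract-call-safe batch chunks."""
--     if batch_size <= 0:
--         raise ValueError("batch_size must be > 0")
--
--     items = [(k, v) for k, v in bribe_to_tokens.items() if v]
--     chunks: List[Tuple[List[str], List[List[str]]]] = []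
--     for i in range(0, len(items), batch_size):
--         part = items[i : i + batch_size]
--         chunks.append(([x[0] for x in part], [x[1] for x in part]))
--     return chunks
-- ===== SOURCE B (Python) =====
-- from typing import Dict, List, Tuple
--
-- def chunk_claim_inputs(
--     bribe_to_tokens: Dict[str, List[str]],
--     batch_size: int,
-- ) -> List[Tuple[List[str], List[List[str]]]]:
--     """Split bribe/token arrays into contract-call-safe batch chunks."""
--     if batch_size <= 0:
--         raise ValueError("batch_size must be > 0")
--
--     chunks: List[Tuple[List[str], List[List[str]]]] = []
--     keys: List[str] = []
--     vals: List[List[str]] = []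
--     for k, v in bribe_to_tokens.items():
--         if not v:
--             continue
--         keys.append(k)
--         vals.append(v)
--         if len(keys) == batch_size:
--             chunks.append((keys, vals))
--             keys, vals = [], []
--     if keys:
--         chunks.append((keys, vals))
--     return chunks
-- ===== Notes on version B (the rewrite author's own statement) =====
-- stated objective: alternative
-- what changed: Replaces the build-a-filtered-list-then-slice-by-index chunking with a single streaming pass over the dict items that filters inline and accumulates key/value buffers, flushing each time the buffer reaches batch_size and once more at the end for the trailing partial chunk.
import Mathlib
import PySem

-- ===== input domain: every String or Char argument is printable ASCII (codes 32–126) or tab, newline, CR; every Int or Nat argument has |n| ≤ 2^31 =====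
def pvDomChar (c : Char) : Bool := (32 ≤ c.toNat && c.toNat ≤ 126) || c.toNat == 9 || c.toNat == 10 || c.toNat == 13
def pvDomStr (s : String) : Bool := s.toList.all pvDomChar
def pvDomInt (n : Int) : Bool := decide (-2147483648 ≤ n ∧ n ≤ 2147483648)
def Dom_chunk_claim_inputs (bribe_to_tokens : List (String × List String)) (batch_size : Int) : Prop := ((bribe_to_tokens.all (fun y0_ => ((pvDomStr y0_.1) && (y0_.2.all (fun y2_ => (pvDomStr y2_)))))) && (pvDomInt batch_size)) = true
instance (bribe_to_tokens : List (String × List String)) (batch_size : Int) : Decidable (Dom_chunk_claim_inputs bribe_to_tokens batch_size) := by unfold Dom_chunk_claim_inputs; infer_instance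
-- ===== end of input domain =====

-- B replaces slice-by-index chunking with a single streaming pass that filters inline and
-- flushes key/value buffers at batch_size (alternative decomposition; same asymptotic cost).


-- ===== PORT A =====
-- Literal port of A: filter truthy items of the dict, then chunk by index range and slices.
-- (batch_size ≤ 0 raises ValueError in Python: excluded by Pre_; the port returns [] there.)
def chunk_claim_inputs (bribe_to_tokens : List (String × List String)) (batch_size : Int) : List (List String × List (List String)) :=
  if batch_size ≤ 0 then []
  else
    let items := ((PySem.Dict.ofList bribe_to_tokens).items).filter (fun kv => !kv.2.isEmpty)
    (PySem.List.pyRange 0 (items.length : Int) batch_size).foldl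
      (fun chunks i =>
        let part := PySem.List.slice items (some i) (some (i + batch_size))
        chunks ++ [(part.map (fun x => x.1), part.map (fun x => x.2))]) []

-- ===== PORT B =====
-- B's trailing flush: after the loop, append the final partial (keys, vals) chunk if non-empty.
def bFinalize (st : List (List String × List (List String)) × List String × List (List String)) :
    List (List String × List (List String)) :=
  if st.2.1.isEmpty then st.1 else st.1 ++ [(st.2.1, st.2.2)]

-- One streaming step of B's loop body: skip falsy values, append to the buffers, flush at batch_size.
def bStep (batch_size : Int)
    (st : List (List String × List (List String)) × List String × List (List String))
    (kv : String × List String) :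
    List (List String × List (List String)) × List String × List (List String) :=
  if kv.2.isEmpty then st
  else
    let keys := st.2.1 ++ [kv.1]
    let vals := st.2.2 ++ [kv.2]
    if (keys.length : Int) == batch_size then (st.1 ++ [(keys, vals)], [], [])
    else (st.1, keys, vals)

def chunk_claim_inputs_alt (bribe_to_tokens : List (String × List String)) (batch_size : Int) : List (List String × List (List String)) :=
  if batch_size ≤ 0 then []
  else bFinalize (((PySem.Dict.ofList bribe_to_tokens).items).foldl (bStep batch_size) ([], [], []))

-- ===== PRECONDITION & SPEC =====
-- On batch_size ≤ 0 the Python A raises ValueError (and so does B); Pre_ excludes exactly those inputs.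
def Pre_chunk_claim_inputs (bribe_to_tokens : List (String × List String)) (batch_size : Int) : Prop := 1 ≤ batch_size
instance (bribe_to_tokens : List (String × List String)) (batch_size : Int) : Decidable (Pre_chunk_claim_inputs bribe_to_tokens batch_size) := by unfold Pre_chunk_claim_inputs; infer_instance
def pvWitness_chunk_claim_inputs : (List (String × List String)) × Int := ([("a", ["t1", "t2"]), ("b", ["t3"]), ("c", [])], 2)
def Spec_chunk_claim_inputs (bribe_to_tokens : List (String × List String)) (batch_size : Int) (out : List (List String × List (List String))) : Prop := out = chunk_claim_inputs_alt bribe_to_tokens batch_size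
instance (bribe_to_tokens : List (String × List String)) (batch_size : Int) (out : List (List String × List (List String))) : Decidable (Spec_chunk_claim_inputs bribe_to_tokens batch_size out) := by unfold Spec_chunk_claim_inputs; infer_instance

-- ===== CLAIM (what is proved, stated in full; the proofs are below) =====
def Claim_equal_chunk_claim_inputs : Prop := ∀ (bribe_to_tokens : List (String × List String)) (batch_size : Int), Dom_chunk_claim_inputs bribe_to_tokens batch_size → Pre_chunk_claim_inputs bribe_to_tokens batch_size → Spec_chunk_claim_inputs bribe_to_tokens batch_size (chunk_claim_inputs bribe_to_tokens batch_size)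

-- ===== LEMMAS AND PROOFS =====

-- The common intermediate: chunks of size n+1.
def chunksOf {α : Type} (n : ℕ) : List α → List (List α)
  | [] => []
  | x :: xs => ((x :: xs).take (n+1)) :: chunksOf n ((x :: xs).drop (n+1))
  termination_by l => l.length
  decreasing_by simp

theorem chunksOf_nil {α : Type} (n : ℕ) : chunksOf n ([] : List α) = [] := by
  rw [chunksOf.eq_def]

theorem chunksOf_ne_nil {α : Type} (n : ℕ) (l : List α) (h : l ≠ []) :
    chunksOf n l = l.take (n+1) :: chunksOf n (l.drop (n+1)) := by
  cases l with
  | nil => exact absurd rfl h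
  | cons x xs => rw [chunksOf.eq_def]

theorem pyRange_pos_cons (a b s : ℤ) (hs : 0 < s) (hab : a < b) :
    PySem.List.pyRange a b s = a :: PySem.List.pyRange (a + s) b s := by
  rw [PySem.List.pyRange_of_pos _ _ hs, PySem.List.pyRange_of_pos _ _ hs]
  have hcount : ((b - a + s - 1) / s).toNat = ((b - (a + s) + s - 1) / s).toNat + 1 := by
    have he : b - a + s - 1 = (b - (a + s) + s - 1) + 1 * s := by ring
    have h2 : 0 ≤ (b - (a + s) + s - 1) / s := Int.ediv_nonneg (by omega) (by omega)
    rw [he, Int.add_mul_ediv_right _ _ (by omega : s ≠ 0)]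
    omega
  rw [if_pos hab, hcount, List.range_succ_eq_map, List.map_cons, List.map_map]
  simp only [List.cons.injEq]
  refine ⟨by simp, ?_⟩
  by_cases h : a + s < b
  · rw [if_pos h]
    apply List.map_congr_left
    intro k _
    simp only [Function.comp_apply]
    push_cast
    ring
  · rw [if_neg h]
    have hz : (b - (a + s) + s - 1) / s = 0 :=
      Int.ediv_eq_zero_of_lt (by omega) (by omega)
    simp [hz]

-- A's indexed slice-fold equals mapping over chunksOf (fuel induction on the remaining length).
theorem aside {α : Type} (n : ℕ) (g : List α → (List String × List (List String))) :
    ∀ (k a : ℕ) (L : List α) (acc : List (List String × List (List String))),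
      L.length ≤ a + k →
      (PySem.List.pyRange (a : ℤ) (L.length : ℤ) ((n : ℤ) + 1)).foldl
        (fun acc i => acc ++ [g (PySem.List.slice L (some i) (some (i + ((n : ℤ) + 1))))]) acc
      = acc ++ (chunksOf n (L.drop a)).map g := by
  intro k
  induction k with
  | zero =>
    intro a L acc hle
    have h1 : PySem.List.pyRange (a : ℤ) (L.length : ℤ) ((n : ℤ) + 1) = [] := by
      rw [PySem.List.pyRange_of_pos _ _ (by omega)]
      rw [if_neg (by exact_mod_cast by omega)]
      simp
    have h2 : L.drop a = [] := List.drop_eq_nil_of_le (by omega)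
    simp [h1, h2, chunksOf_nil]
  | succ k ih =>
    intro a L acc hle
    by_cases hab : a < L.length
    · rw [pyRange_pos_cons _ _ _ (by omega) (by exact_mod_cast hab)]
      rw [List.foldl_cons]
      have hcast : ((a : ℤ) + ((n : ℤ) + 1)) = ((a + (n + 1) : ℕ) : ℤ) := by push_cast; ring
      have hslice : PySem.List.slice L (some (a : ℤ)) (some ((a : ℤ) + ((n : ℤ) + 1)))
          = (L.drop a).take (n + 1) := by
        rw [show ((a : ℤ) + ((n : ℤ) + 1)) = ((a : ℤ) + ((n + 1 : ℕ) : ℤ)) by push_cast; ring]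
        exact PySem.List.slice_natCast_add L a (n + 1)
      rw [hslice, hcast, ih (a + (n + 1)) L _ (by omega)]
      rw [chunksOf_ne_nil n (L.drop a) (by
        intro hnil
        have := congrArg List.length hnil
        simp at this
        omega)]
      rw [List.map_cons, List.drop_drop]
      simp
    · have h1 : PySem.List.pyRange (a : ℤ) (L.length : ℤ) ((n : ℤ) + 1) = [] := by
        rw [PySem.List.pyRange_of_pos _ _ (by omega)]
        rw [if_neg (by exact_mod_cast by omega)]
        simp
      have h2 : L.drop a = [] := List.drop_eq_nil_of_le (by omega)
      simp [h1, h2, chunksOf_nil]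

-- bStep is the identity on falsy items, so the fold over all items equals the fold over the filtered items.
theorem foldl_bStep_filter (bs : Int) :
    ∀ (items : List (String × List String))
      (st : List (List String × List (List String)) × List String × List (List String)),
      items.foldl (bStep bs) st = (items.filter (fun kv => !kv.2.isEmpty)).foldl (bStep bs) st := by
  intro items
  induction items with
  | nil => intro st; rfl
  | cons kv rest ih =>
    intro st
    by_cases h : kv.2.isEmpty
    · simp [h, List.foldl_cons, bStep, ih]
    · simp only [List.filter_cons, List.foldl_cons]
      rw [if_pos (by simp [h])]
      rw [List.foldl_cons, ih]

-- B's streaming fold with a partial buffer P, then the trailing flush, equals chunks ++ chunksOf (P ++ L) in column form.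
theorem bside (n : ℕ) :
    ∀ (L : List (String × List String))
      (chunks : List (List String × List (List String)))
      (P : List (String × List String)),
      (∀ kv ∈ L, kv.2.isEmpty = false) → P.length < n + 1 →
      bFinalize (L.foldl (bStep ((n : ℤ) + 1)) (chunks, P.map (fun x => x.1), P.map (fun x => x.2)))
      = chunks ++ (chunksOf n (P ++ L)).map (fun part => (part.map (fun x => x.1), part.map (fun x => x.2))) := by
  intro L
  induction L with
  | nil =>
    intro chunks P htruthy hlen
    cases P with
    | nil => simp [bFinalize, chunksOf_nil]
    | cons p ps =>
      rw [List.foldl_nil, List.append_nil, chunksOf_ne_nil n (p :: ps) (by simp)]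
      have ht : (p :: ps).take (n + 1) = p :: ps := List.take_of_length_le (by simp at hlen ⊢; omega)
      have hd : (p :: ps).drop (n + 1) = [] := List.drop_eq_nil_of_le (by simp at hlen ⊢; omega)
      simp [bFinalize, ht, hd, chunksOf_nil]
  | cons kv rest ih =>
    intro chunks P htruthy hlen
    have hkv : kv.2.isEmpty = false := htruthy kv (by simp)
    rw [List.foldl_cons]
    rw [show bStep ((n : ℤ) + 1) (chunks, P.map (fun x => x.1), P.map (fun x => x.2)) kv
        = (if ((P.length : ℤ) + 1 : ℤ) == (n : ℤ) + 1
           then (chunks ++ [((P ++ [kv]).map (fun x => x.1), (P ++ [kv]).map (fun x => x.2))], [], [])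
           else (chunks, (P ++ [kv]).map (fun x => x.1), (P ++ [kv]).map (fun x => x.2)))
      by simp [bStep, hkv]]
    by_cases hfull : P.length = n
    · rw [if_pos (by simp [hfull])]
      have hrec := ih
        (chunks ++ [((P ++ [kv]).map (fun x => x.1), (P ++ [kv]).map (fun x => x.2))]) []
        (fun x hx => htruthy x (by simp [hx])) (by simp)
      simp only [List.map_nil, List.nil_append] at hrec
      rw [hrec]
      rw [show P ++ kv :: rest = (P ++ [kv]) ++ rest by simp]
      rw [chunksOf_ne_nil n ((P ++ [kv]) ++ rest) (by simp)]
      have hlen2 : (P ++ [kv]).length = n + 1 := by simp [hfull]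
      rw [List.take_left' hlen2, List.drop_left' hlen2]
      simp
    · rw [if_neg (by
        simp only [beq_iff_eq]
        intro hc
        apply hfull
        omega)]
      have hrec := ih chunks (P ++ [kv]) (fun x hx => htruthy x (by simp [hx]))
        (by simp only [List.length_append, List.length_cons, List.length_nil]; omega)
      rw [hrec]
      simp

-- ===== VERDICT (by name: the statement is the Claim_ definition above) =====
theorem chunk_claim_inputs_spec : Claim_equal_chunk_claim_inputs := by
  intro btt bs _hdom hpre
  unfold Spec_chunk_claim_inputs chunk_claim_inputs chunk_claim_inputs_alt
  have hpre' : (1 : ℤ) ≤ bs := hpre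
  rw [if_neg (by omega), if_neg (by omega)]
  set items := ((PySem.Dict.ofList btt).items) with hitems
  set L := items.filter (fun kv => !kv.2.isEmpty) with hL
  set n : ℕ := (bs - 1).toNat with hn
  have hbs : ((n : ℤ) + 1) = bs := by
    have : ((bs - 1).toNat : ℤ) = bs - 1 := Int.toNat_of_nonneg (by omega)
    omega
  have htruthy : ∀ kv ∈ L, kv.2.isEmpty = false := by
    intro kv hkv
    have := List.of_mem_filter hkv
    simpa using this
  have hA := aside n (fun part => (part.map (fun x => x.1), part.map (fun x => x.2)))
    L.length 0 L [] (by omega)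
  have hB := bside n L [] [] htruthy (by simp)
  simp only [List.map_nil, List.nil_append, Nat.cast_zero, List.drop_zero] at hA hB
  rw [foldl_bStep_filter, ← hL, ← hbs, hA, hB]
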